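-- pv_equiv track=rewrite | github.com/Ane1y/try-to-become-better-every-day | algorithms/greedy algorithms/k as the sum of natural terms.py | sum_of_natural_numbers
-- ===== SOURCE A (Python) =====
-- def sum_of_natural_numbers(n):
--     sum = 0
--     i = 1
--     k = 0
--     terms = []
--     while n > sum:
--         sum += i
--         terms.append(i)
--         i += 1
--         k += 1
--         if sum > n:
--             k -= 1
--             terms.remove(sum - n)
--             return k, terms
--     return k, terms
-- ===== SOURCE B (Python) =====
-- def sum_of_natural_numbers(n):
--     # Binary search for the largest m with m*(m+1)//2 <= n, then build the
--     # answer directly, instead of accumulating term by term.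
--     if n <= 0:
--         return 0, []
--     lo, hi = 0, n
--     while lo < hi:
--         mid = (lo + hi + 1) // 2
--         if mid * (mid + 1) // 2 <= n:
--             lo = mid
--         else:
--             hi = mid - 1
--     m = lo
--     if m * (m + 1) // 2 == n:
--         return m, list(range(1, m + 1))
--     terms = list(range(1, m + 2))
--     terms.remove((m + 1) * (m + 2) // 2 - n)
--     return m, terms
-- ===== Notes on version B (the rewrite author's own statement) =====
-- stated objective: alternative
-- what changed: Replaces A's term-by-term accumulation loop with a binary search for the largest m whose triangular number is at most n, building the answer list directly with range() and removing the one element that closes the gap.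
import Mathlib
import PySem

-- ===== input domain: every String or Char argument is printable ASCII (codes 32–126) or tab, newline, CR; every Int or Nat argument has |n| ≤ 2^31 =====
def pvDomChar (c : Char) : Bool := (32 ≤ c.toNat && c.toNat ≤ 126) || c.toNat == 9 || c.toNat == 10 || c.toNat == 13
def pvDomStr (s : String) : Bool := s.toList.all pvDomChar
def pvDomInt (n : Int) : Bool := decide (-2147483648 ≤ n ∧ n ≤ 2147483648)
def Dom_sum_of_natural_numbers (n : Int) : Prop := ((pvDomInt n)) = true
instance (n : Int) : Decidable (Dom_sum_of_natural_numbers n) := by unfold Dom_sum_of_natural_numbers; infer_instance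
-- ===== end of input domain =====

-- B replaces A's term-by-term accumulation with a binary search for the largest m with
-- triangular number at most n plus direct range construction (objective: alternative algorithm).

-- ===== PORT A =====
-- The `while n > sum` loop of A.  The `1 ≤ i` conjunct is a termination guard only:
-- it holds on every reachable call (i starts at 1 and only grows) and lets the
-- measure (n - sum).toNat decrease.  `terms.remove(sum - n)` never raises for an
-- int argument (sum - n is always one of the appended terms), so `.getD []` is
-- never the value Python returns on an admitted input.
def pvALoop (n sum i k : Int) (terms : List Int) : Int × List Int :=
  if _h : sum < n ∧ 1 ≤ i then
    let sum' := sum + i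
    let terms' := terms ++ [i]
    if n < sum' then
      ((k + 1) - 1, (PySem.List.remove? terms' (sum' - n)).getD [])
    else
      pvALoop n sum' (i + 1) (k + 1) terms'
  else (k, terms)
termination_by (n - sum).toNat
decreasing_by omega

def sum_of_natural_numbers (n : Int) : Int × List Int :=
  pvALoop n 0 1 0 []

-- ===== PORT B =====
-- binary search: largest m with m*(m+1)//2 <= n (loop `while lo < hi` of Source B)
def pvBSearch (n lo hi : Int) : Int :=
  if _h : lo < hi then
    let mid := PySem.Int.floordiv (lo + hi + 1) 2
    if PySem.Int.floordiv (mid * (mid + 1)) 2 ≤ n then pvBSearch n mid hi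
    else pvBSearch n lo (mid - 1)
  else lo
termination_by (hi - lo).toNat
decreasing_by
  all_goals rw [PySem.Int.floordiv_eq_ediv_of_pos (by norm_num)] at *
  all_goals omega

def sum_of_natural_numbers_alt (n : Int) : Int × List Int :=
  if n ≤ 0 then (0, [])
  else
    let m := pvBSearch n 0 n
    if PySem.Int.floordiv (m * (m + 1)) 2 = n then
      (m, PySem.List.pyRange 1 (m + 1) 1)
    else
      (m, (PySem.List.remove? (PySem.List.pyRange 1 (m + 2) 1)
            (PySem.Int.floordiv ((m + 1) * (m + 2)) 2 - n)).getD [])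

-- ===== PRECONDITION & SPEC =====
def Spec_sum_of_natural_numbers (n : Int) (out : Int × List Int) : Prop := out = sum_of_natural_numbers_alt n
instance (n : Int) (out : Int × List Int) : Decidable (Spec_sum_of_natural_numbers n out) := by unfold Spec_sum_of_natural_numbers; infer_instance

-- ===== CLAIM (what is proved, stated in full; the proofs are below) =====
def Claim_equal_sum_of_natural_numbers : Prop := ∀ (n : Int), Dom_sum_of_natural_numbers n → Spec_sum_of_natural_numbers n (sum_of_natural_numbers n)

-- ===== LEMMAS AND PROOFS =====

-- triangular number, written with Euclidean `/` (equal to Python // here: divisor 2 > 0)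
def pvTri (m : Int) : Int := m * (m + 1) / 2

lemma pvTri_two (m : Int) : 2 * pvTri m = m * (m + 1) := by
  have h : (2 : Int) ∣ m * (m + 1) := (Int.even_mul_succ_self m).two_dvd
  unfold pvTri
  exact Int.mul_ediv_cancel' h

lemma pvTri_lt (a b : Int) (ha : 0 ≤ a) (hab : a < b) : pvTri a < pvTri b := by
  have h1 := pvTri_two a
  have h2 := pvTri_two b
  nlinarith

lemma pvTri_succ (m : Int) : pvTri (m + 1) = pvTri m + (m + 1) := by
  have h1 := pvTri_two m
  have h2 := pvTri_two (m + 1)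
  nlinarith

lemma pvTri_floordiv (m : Int) : PySem.Int.floordiv (m * (m + 1)) 2 = pvTri m := by
  rw [PySem.Int.floordiv_eq_ediv_of_pos (by norm_num)]; rfl

-- the common value both programs return for n ≥ 1, expressed through the unique
-- m with pvTri m ≤ n < pvTri (m+1)
def pvAnswer (n m : Int) : Int × List Int :=
  if pvTri m = n then (m, PySem.List.pyRange 1 (m + 1) 1)
  else (m, (PySem.List.remove? (PySem.List.pyRange 1 (m + 2) 1) (pvTri (m + 1) - n)).getD [])

lemma pvBSearch_char (n : Int) :
    ∀ (j : Nat) (lo hi : Int), 0 ≤ lo → lo ≤ hi → pvTri lo ≤ n → n < pvTri (hi + 1) →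
      (hi - lo).toNat = j →
      0 ≤ pvBSearch n lo hi ∧ pvTri (pvBSearch n lo hi) ≤ n ∧ n < pvTri (pvBSearch n lo hi + 1) := by
  intro j
  induction j using Nat.strong_induction_on with
  | _ j ih =>
    intro lo hi hlo hle hl hh hj
    rw [pvBSearch]
    by_cases hlt : lo < hi
    · rw [dif_pos hlt]
      have hmid : PySem.Int.floordiv (lo + hi + 1) 2 = (lo + hi + 1) / 2 :=
        PySem.Int.floordiv_eq_ediv_of_pos (by norm_num)
      simp only [pvTri_floordiv, hmid]
      set mid := (lo + hi + 1) / 2 with hmiddef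
      have hb1 : lo + 1 ≤ mid := by rw [hmiddef]; omega
      have hb2 : mid ≤ hi := by rw [hmiddef]; omega
      by_cases hc : pvTri mid ≤ n
      · rw [if_pos hc]
        exact ih ((hi - mid).toNat) (by omega) mid hi (by omega) hb2 hc hh rfl
      · rw [if_neg hc]
        have hlt2 : n < pvTri (mid - 1 + 1) := by
          have : n < pvTri mid := by omega
          simpa using this
        exact ih ((mid - 1 - lo).toNat) (by omega) lo (mid - 1) hlo (by omega) hl hlt2 rfl
    · rw [dif_neg hlt]
      have : lo = hi := by omega
      subst this
      exact ⟨hlo, hl, hh⟩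

lemma pvALoop_char (n m : Int) (hm : 0 ≤ m) (h1 : pvTri m ≤ n) (h2 : n < pvTri (m + 1)) :
    ∀ (j : Nat) (i : Int), 1 ≤ i → i ≤ m + 1 → (m + 1 - i).toNat = j →
      pvALoop n (pvTri (i - 1)) i (i - 1) (PySem.List.pyRange 1 i 1) = pvAnswer n m := by
  intro j
  induction j using Nat.strong_induction_on with
  | _ j ih =>
    intro i hi1 hile hj
    rw [pvALoop]
    by_cases hlast : i = m + 1
    · subst hlast
      simp only [show m + 1 - 1 = m by ring]
      by_cases heq : pvTri m = n
      · have hguard : ¬ (pvTri m < n ∧ 1 ≤ m + 1) := by omega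
        rw [dif_neg hguard]
        unfold pvAnswer
        simp [heq]
      · have hlt : pvTri m < n := lt_of_le_of_ne h1 heq
        have hguard : pvTri m < n ∧ 1 ≤ m + 1 := ⟨hlt, by omega⟩
        rw [dif_pos hguard]
        have hsum : pvTri m + (m + 1) = pvTri (m + 1) := (pvTri_succ m).symm
        rw [hsum]
        simp only [h2, if_pos]
        have hterms : PySem.List.pyRange 1 (m + 1) 1 ++ [m + 1] = PySem.List.pyRange 1 (m + 2) 1 := by
          have := PySem.List.pyRange_one_succ_right (show (1:Int) ≤ m + 1 by omega)
          simpa [show m + 1 + 1 = m + 2 by ring] using this.symm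
        rw [hterms]
        unfold pvAnswer
        simp [heq]
    · have hile' : i ≤ m := by omega
      have hm1 : 1 ≤ m := by omega
      have hlt : pvTri (i - 1) < n := by
        have : pvTri (i - 1) < pvTri m := pvTri_lt (i - 1) m (by omega) (by omega)
        omega
      have hguard : pvTri (i - 1) < n ∧ 1 ≤ i := ⟨hlt, hi1⟩
      rw [dif_pos hguard]
      have hsum : pvTri (i - 1) + i = pvTri i := by
        have := pvTri_succ (i - 1)
        simpa [show i - 1 + 1 = i by ring] using this.symm
      rw [hsum]
      have hnotlt : ¬ n < pvTri i := by
        have h3 : pvTri i ≤ pvTri m := by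
          rcases lt_or_eq_of_le hile' with h | h
          · exact le_of_lt (pvTri_lt i m (by omega) h)
          · rw [h]
        omega
      rw [if_neg hnotlt]
      have hterms : PySem.List.pyRange 1 i 1 ++ [i] = PySem.List.pyRange 1 (i + 1) 1 :=
        (PySem.List.pyRange_one_succ_right (show (1:Int) ≤ i by omega)).symm
      rw [hterms]
      have := ih ((m + 1 - (i + 1)).toNat) (by omega) (i + 1) (by omega) (by omega) rfl
      simpa [show i + 1 - 1 = i by ring] using this

-- ===== VERDICT (by name: the statement is the Claim_ definition above) =====
theorem sum_of_natural_numbers_spec : Claim_equal_sum_of_natural_numbers := by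
  intro n _
  unfold Spec_sum_of_natural_numbers
  by_cases hn : n ≤ 0
  · unfold sum_of_natural_numbers sum_of_natural_numbers_alt
    rw [pvALoop]
    have hguard : ¬ ((0 : Int) < n ∧ (1 : Int) ≤ 1) := by omega
    rw [dif_neg hguard, if_pos hn]
  · have hn1 : 1 ≤ n := by omega
    have hinit : pvTri 0 ≤ n ∧ n < pvTri (n + 1) := by
      constructor
      · unfold pvTri; simp; omega
      · have := pvTri_two (n + 1)
        nlinarith
    obtain ⟨hm0, hml, hmh⟩ :=
      pvBSearch_char n ((n - 0).toNat) 0 n (le_refl 0) (by omega) hinit.1 hinit.2 rfl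
    set m := pvBSearch n 0 n with hmdef
    have hA : sum_of_natural_numbers n = pvAnswer n m := by
      unfold sum_of_natural_numbers
      have h0 : pvTri 0 = 0 := by unfold pvTri; simp
      have hnil : PySem.List.pyRange 1 1 1 = [] := PySem.List.pyRange_one_eq_nil (by omega)
      have := pvALoop_char n m hm0 hml hmh ((m + 1 - 1).toNat) 1 (by omega) (by omega) rfl
      simpa [h0, hnil] using this
    have hB : sum_of_natural_numbers_alt n = pvAnswer n m := by
      unfold sum_of_natural_numbers_alt pvAnswer
      rw [if_neg (by omega : ¬ n ≤ 0)]
      have h2' : PySem.Int.floordiv ((m + 1) * (m + 2)) 2 = pvTri (m + 1) := by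
        have := pvTri_floordiv (m + 1)
        simpa [show m + 1 + 1 = m + 2 by ring] using this
      simp only [← hmdef]
      rw [pvTri_floordiv, h2']
    rw [hA, hB]
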